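-- pv_equiv track=rewrite | github.com/idionisov/sndMuonFlux | pythonHelpers/bunch_struct.py | get_bunch_counts
-- ===== SOURCE A (Python) =====
-- def get_bunch_counts(
--     bunch_slots: dict,
--     include: tuple = (),
--     exclude: tuple = ()
-- ):
--     if not include:
--         return 0
--
--     result = set(bunch_slots[include[0]])
--     for key in include[1:]:
--         result &= set(bunch_slots[key])
--
--     for key in exclude:
--         if key in bunch_slots:
--             result -= set(bunch_slots[key])
--
--     return len(result)
-- ===== SOURCE B (Python) =====
-- def get_bunch_counts(
--     bunch_slots: dict,
--     include: tuple = (),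
--     exclude: tuple = ()
-- ):
--     if not include:
--         return 0
--     others = [set(bunch_slots[k]) for k in include[1:]]
--     excl = [set(bunch_slots[k]) for k in exclude if k in bunch_slots]
--     count = 0
--     for x in set(bunch_slots[include[0]]):
--         if all(x in s for s in others) and not any(x in s for s in excl):
--             count += 1
--     return count
-- ===== Notes on version B (the rewrite author's own statement) =====
-- stated objective: alternative
-- what changed: Replaces iterated set intersection/difference operations with a single candidate-driven membership pass: materialize the other include sets and present exclude sets once, then count distinct elements of the first include set that lie in all include sets and no exclude set.
import Mathlib
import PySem

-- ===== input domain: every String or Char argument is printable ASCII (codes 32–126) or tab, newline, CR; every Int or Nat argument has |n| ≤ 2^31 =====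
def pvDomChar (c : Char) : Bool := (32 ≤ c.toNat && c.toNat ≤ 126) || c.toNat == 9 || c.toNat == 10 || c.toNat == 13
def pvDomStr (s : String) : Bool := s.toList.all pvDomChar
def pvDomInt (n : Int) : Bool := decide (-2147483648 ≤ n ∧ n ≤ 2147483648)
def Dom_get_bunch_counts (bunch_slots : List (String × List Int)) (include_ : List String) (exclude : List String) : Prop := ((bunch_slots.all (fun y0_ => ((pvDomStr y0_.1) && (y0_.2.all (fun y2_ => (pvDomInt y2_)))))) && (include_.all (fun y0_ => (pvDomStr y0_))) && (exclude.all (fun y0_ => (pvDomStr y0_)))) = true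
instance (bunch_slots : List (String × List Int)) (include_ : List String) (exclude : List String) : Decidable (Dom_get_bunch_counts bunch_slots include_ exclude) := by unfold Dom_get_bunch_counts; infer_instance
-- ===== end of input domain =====

-- B replaces A's folded set intersections/differences by one candidate-driven membership
-- pass over the distinct elements of the first include set (objective: alternative).

-- ===== PORT A =====
def get_bunch_counts (bunch_slots : List (String × List Int)) (include_ : List String) (exclude : List String) : Int :=
  match include_ with
  | [] => 0
  | k0 :: rest =>
    let d := PySem.Dict.mk bunch_slots
    let result0 : PySem.Set Int := PySem.Set.ofList ((d.get? k0).getD [])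
    let result1 : PySem.Set Int :=
      rest.foldl (fun r k => PySem.Set.inter r (PySem.Set.ofList ((d.get? k).getD []))) result0
    let result2 : PySem.Set Int :=
      exclude.foldl (fun r k =>
        if d.contains k then PySem.Set.diff r (PySem.Set.ofList ((d.get? k).getD [])) else r) result1
    PySem.Set.len result2

-- ===== PORT B =====
def get_bunch_counts_alt (bunch_slots : List (String × List Int)) (include_ : List String) (exclude : List String) : Int :=
  match include_ with
  | [] => 0
  | k0 :: rest =>
    let d := PySem.Dict.mk bunch_slots
    let others : List (PySem.Set Int) := rest.map (fun k => PySem.Set.ofList ((d.get? k).getD []))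
    let excl : List (PySem.Set Int) :=
      (exclude.filter (fun k => d.contains k)).map (fun k => PySem.Set.ofList ((d.get? k).getD []))
    (PySem.Set.ofList ((d.get? k0).getD [])).foldl
      (fun c x =>
        if others.all (fun s => PySem.Set.contains s x) && !(excl.any (fun s => PySem.Set.contains s x))
        then c + 1 else c) (0 : Int)

-- ===== PRECONDITION & SPEC =====
-- Pre_ excludes exactly the inputs on which A raises KeyError: a nonempty include
-- list containing a key absent from bunch_slots (B raises there too).
def Pre_get_bunch_counts (bunch_slots : List (String × List Int)) (include_ : List String) (exclude : List String) : Prop :=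
  include_.all (fun k => (PySem.Dict.mk bunch_slots).contains k) = true
instance (bunch_slots : List (String × List Int)) (include_ : List String) (exclude : List String) : Decidable (Pre_get_bunch_counts bunch_slots include_ exclude) := by unfold Pre_get_bunch_counts; infer_instance
def pvWitness_get_bunch_counts : (List (String × List Int)) × List String × List String :=
  ([("a", [1, 2, 3]), ("b", [2, 3])], ["a", "b"], ["c"])

def Spec_get_bunch_counts (bunch_slots : List (String × List Int)) (include_ : List String) (exclude : List String) (out : Int) : Prop := out = get_bunch_counts_alt bunch_slots include_ exclude
instance (bunch_slots : List (String × List Int)) (include_ : List String) (exclude : List String) (out : Int) : Decidable (Spec_get_bunch_counts bunch_slots include_ exclude out) := by unfold Spec_get_bunch_counts; infer_instance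

-- ===== CLAIM (what is proved, stated in full; the proofs are below) =====
def Claim_equal_get_bunch_counts : Prop := ∀ (bunch_slots : List (String × List Int)) (include_ : List String) (exclude : List String), Dom_get_bunch_counts bunch_slots include_ exclude → Pre_get_bunch_counts bunch_slots include_ exclude → Spec_get_bunch_counts bunch_slots include_ exclude (get_bunch_counts bunch_slots include_ exclude)

-- ===== LEMMAS AND PROOFS =====

theorem set_inter_eq_filter (s t : PySem.Set Int) :
    PySem.Set.inter s t = s.filter (fun x => PySem.Set.contains t x) := by
  simp [PySem.Set.inter]

theorem set_diff_eq_filter (s t : PySem.Set Int) :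
    PySem.Set.diff s t = s.filter (fun x => !PySem.Set.contains t x) := by
  simp [PySem.Set.diff]

theorem foldl_filter_eq_filter_all {κ : Type} (p : κ → Int → Bool) (ks : List κ) (s : List Int) :
    ks.foldl (fun r k => r.filter (p k)) s = s.filter (fun x => ks.all (fun k => p k x)) := by
  induction ks generalizing s with
  | nil => simp
  | cons k ks ih =>
    simp only [List.foldl_cons, ih, List.filter_filter, List.all_cons]
    exact List.filter_congr (fun x _ => by simp [Bool.and_comm])

theorem main_eq (bs : List (String × List Int)) (k0 : String) (rest exc : List String) :
    get_bunch_counts bs (k0 :: rest) exc = get_bunch_counts_alt bs (k0 :: rest) exc := by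
  unfold get_bunch_counts get_bunch_counts_alt
  simp only [PySem.List.foldl_if_add_one]
  rw [show (fun (r : PySem.Set Int) k => PySem.Set.inter r (PySem.Set.ofList (((PySem.Dict.mk bs).get? k).getD []))) = fun r k => r.filter (fun x => PySem.Set.contains (PySem.Set.ofList (((PySem.Dict.mk bs).get? k).getD [])) x) from funext fun r => funext fun k => set_inter_eq_filter ..]
  rw [PySem.List.foldl_if_eq_foldl_filter]
  rw [show (fun (r : PySem.Set Int) k => PySem.Set.diff r (PySem.Set.ofList (((PySem.Dict.mk bs).get? k).getD []))) = fun r k => r.filter (fun x => !PySem.Set.contains (PySem.Set.ofList (((PySem.Dict.mk bs).get? k).getD [])) x) from funext fun r => funext fun k => set_diff_eq_filter ..]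
  rw [foldl_filter_eq_filter_all, foldl_filter_eq_filter_all]
  simp only [PySem.Set.len, List.filter_filter, ← List.countP_eq_length_filter, zero_add, List.all_map, List.any_map]
  congr 1
  apply List.countP_congr
  intro x _
  simp [Bool.and_comm, List.all_eq_not_any_not]

-- ===== VERDICT (by name: the statement is the Claim_ definition above) =====
theorem get_bunch_counts_spec : Claim_equal_get_bunch_counts := by
  intro bs inc exc _ _
  unfold Spec_get_bunch_counts
  match inc with
  | [] => rfl
  | k0 :: rest => exact main_eq bs k0 rest exc
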